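-- pv_equiv track=rewrite | github.com/eduardocerqueira/seeker | seeker/snippet/dupes.py | parse_duplicate_groups
-- ===== SOURCE A (Python) =====
-- def parse_duplicate_groups(fdupes_output):
--     groups = []
--     current_group = []
--
--     for line in fdupes_output.strip().split("\n"):
--         line = line.strip()
--         if line == "":
--             if len(current_group) > 1:
--                 groups.append(current_group)
--             current_group = []
--         else:
--             current_group.append(line)
--
--     if len(current_group) > 1:
--         groups.append(current_group)
--
--     return groups
-- ===== SOURCE B (Python) =====
-- def parse_duplicate_groups(fdupes_output):
--     # Run-scanning: split off each maximal run of non-empty stripped lines,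
--     # keep the runs longer than 1. No accumulator/flush bookkeeping.
--     lines = [l.strip() for l in fdupes_output.strip().split("\n")]
--     groups = []
--     rest = lines
--     while rest:
--         head, rest = rest[0], rest[1:]
--         if head != "":
--             run = [head]
--             while rest and rest[0] != "":
--                 run.append(rest[0])
--                 rest = rest[1:]
--             if len(run) > 1:
--                 groups.append(run)
--     return groups
-- ===== Notes on version B (the rewrite author's own statement) =====
-- stated objective: alternative
-- what changed: Replaces the accumulator-with-blank-line-flush loop (plus trailing flush) by a run-scanning pass that pre-strips the lines once and slices off each maximal run of non-empty lines, keeping runs of length > 1.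
import Mathlib
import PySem

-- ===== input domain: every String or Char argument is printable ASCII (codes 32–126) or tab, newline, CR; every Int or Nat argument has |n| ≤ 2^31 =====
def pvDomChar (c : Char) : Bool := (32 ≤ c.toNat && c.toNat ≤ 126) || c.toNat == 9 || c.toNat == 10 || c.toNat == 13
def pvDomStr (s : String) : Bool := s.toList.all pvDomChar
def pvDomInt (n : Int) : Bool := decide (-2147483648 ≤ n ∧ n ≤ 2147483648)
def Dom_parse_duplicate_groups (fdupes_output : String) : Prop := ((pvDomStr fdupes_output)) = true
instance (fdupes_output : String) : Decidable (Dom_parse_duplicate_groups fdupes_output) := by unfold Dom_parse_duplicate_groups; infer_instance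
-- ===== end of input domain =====

-- B replaces A's accumulator-with-flush loop by run-scanning over pre-stripped lines (alternative decomposition, same cost).

-- ===== PORT A =====
-- state = (groups, current_group); one loop step of A (strips the line itself)
def pvAStep (st : List (List String) × List String) (line0 : String) :
    List (List String) × List String :=
  let line := PySem.Str.strip line0
  if line = "" then
    (if st.2.length > 1 then st.1 ++ [st.2] else st.1, [])
  else
    (st.1, st.2 ++ [line])

def parse_duplicate_groups (fdupes_output : String) : List (List String) :=
  let st := ((PySem.Str.split? (PySem.Str.strip fdupes_output) "\n").getD []).foldl pvAStep ([], [])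
  if st.2.length > 1 then st.1 ++ [st.2] else st.1

-- ===== PORT B =====
-- B's outer while loop: drop empty heads, slice off one maximal non-empty run at a time
def pvBScan : List String → List (List String)
  | [] => []
  | head :: rest =>
    if head = "" then pvBScan rest
    else
      let run := head :: rest.takeWhile (fun x => x ≠ "")
      let rest' := rest.dropWhile (fun x => x ≠ "")
      if run.length > 1 then run :: pvBScan rest' else pvBScan rest'
  termination_by ls => ls.length
  decreasing_by
  all_goals simp
  all_goals exact List.length_dropWhile_le _ _

def parse_duplicate_groups_alt (fdupes_output : String) : List (List String) :=
  let lines := ((PySem.Str.split? (PySem.Str.strip fdupes_output) "\n").getD []).map PySem.Str.strip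
  pvBScan lines

-- ===== PRECONDITION & SPEC =====
def Spec_parse_duplicate_groups (fdupes_output : String) (out : List (List String)) : Prop := out = parse_duplicate_groups_alt fdupes_output
instance (fdupes_output : String) (out : List (List String)) : Decidable (Spec_parse_duplicate_groups fdupes_output out) := by unfold Spec_parse_duplicate_groups; infer_instance

-- ===== CLAIM (what is proved, stated in full; the proofs are below) =====
def Claim_equal_parse_duplicate_groups : Prop := ∀ (fdupes_output : String), Dom_parse_duplicate_groups fdupes_output → Spec_parse_duplicate_groups fdupes_output (parse_duplicate_groups fdupes_output)

-- ===== LEMMAS AND PROOFS =====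
-- A's step on an already-stripped line
def pvStep (st : List (List String) × List String) (line : String) :
    List (List String) × List String :=
  if line = "" then
    (if st.2.length > 1 then st.1 ++ [st.2] else st.1, [])
  else
    (st.1, st.2 ++ [line])

def pvFinish (st : List (List String) × List String) : List (List String) :=
  if st.2.length > 1 then st.1 ++ [st.2] else st.1

-- emitting the leading run is exactly one unfolding of pvBScan
theorem pvBScan_emit (ls : List String) :
    (if (ls.takeWhile (fun x => x ≠ "")).length > 1 then [ls.takeWhile (fun x => x ≠ "")] else [])
      ++ pvBScan (ls.dropWhile (fun x => x ≠ "")) = pvBScan ls := by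
  cases ls with
  | nil => simp [pvBScan]
  | cons h t =>
    by_cases hh : h = ""
    · subst hh; simp [pvBScan, List.takeWhile, List.dropWhile]
    · rw [pvBScan]
      simp [List.takeWhile, List.dropWhile, hh]
      split <;> simp

theorem pvFold_eq (ls : List String) (groups : List (List String)) (cur : List String) :
    pvFinish (ls.foldl pvStep (groups, cur)) =
      groups ++
        (if (cur ++ ls.takeWhile (fun x => x ≠ "")).length > 1
          then [cur ++ ls.takeWhile (fun x => x ≠ "")] else [])
        ++ pvBScan (ls.dropWhile (fun x => x ≠ "")) := by
  induction ls generalizing groups cur with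
  | nil => simp [pvFinish, pvBScan]; split <;> simp
  | cons h t ih =>
    by_cases hh : h = ""
    · subst hh
      have h1 : List.takeWhile (fun x => x ≠ "") ("" :: t) = ([] : List String) := by simp
      have h2 : List.dropWhile (fun x => x ≠ "") ("" :: t) = "" :: t := by simp
      have h3 : pvBScan ("" :: t) = pvBScan t := by rw [pvBScan]; simp
      rw [h1, h2, h3, ← pvBScan_emit t]
      simp only [List.foldl_cons, pvStep, reduceIte]
      rw [ih]
      by_cases hc : 1 < cur.length <;> simp [hc, List.append_assoc]
    · have h1 : List.takeWhile (fun x => x ≠ "") (h :: t) = h :: List.takeWhile (fun x => x ≠ "") t := by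
        simp [hh]
      have h2 : List.dropWhile (fun x => x ≠ "") (h :: t) = List.dropWhile (fun x => x ≠ "") t := by
        simp [hh]
      rw [h1, h2]
      simp only [List.foldl_cons, pvStep, if_neg hh]
      rw [ih]
      simp [List.append_assoc]

-- ===== VERDICT (by name: the statement is the Claim_ definition above) =====
theorem parse_duplicate_groups_spec : Claim_equal_parse_duplicate_groups := by
  have key : ∀ raw : List String,
      pvFinish (raw.foldl pvAStep ([], [])) = pvBScan (raw.map PySem.Str.strip) := by
    intro raw
    have hmap : raw.foldl pvAStep ([], ([] : List String)) = (raw.map PySem.Str.strip).foldl pvStep ([], []) := by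
      rw [List.foldl_map]; rfl
    rw [hmap, pvFold_eq]
    simp only [List.nil_append]
    exact pvBScan_emit _
  intro s _
  exact key _
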